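-- pv_equiv track=rewrite | github.com/VittorioRossetto/LLMsforSolverSelection | tools/unify_fzn_descriptions.py | derive_canonical_name
-- ===== SOURCE A (Python) =====
-- from typing import Dict, Iterable, List, Tuple
--
-- TYPE_TOKENS = {
--     "int",
--     "float",
--     "bool",
--     "set",
--     "var",
--     "opt",
--     "array",
-- }
--
-- def _common_prefix_tokens(token_lists: List[List[str]]) -> List[str]:
--     if not token_lists:
--         return []
--
--     min_len = min(len(toks) for toks in token_lists)
--     prefix: List[str] = []
--     for i in range(min_len):
--         token = token_lists[0][i]
--         if all(toks[i] == token for toks in token_lists[1:]):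
--             prefix.append(token)
--         else:
--             break
--     return prefix
--
-- def _strip_leading_type_tokens(tokens: List[str]) -> List[str]:
--     # Remove a run of leading generic/type tokens (e.g., int_lin_eq -> lin_eq).
--     i = 0
--     while i < len(tokens) and tokens[i] in TYPE_TOKENS:
--         i += 1
--     return tokens[i:] if i < len(tokens) else tokens
--
-- def derive_canonical_name(keys: List[str], drop_leading_types: bool) -> str:
--     if len(keys) == 1:
--         return keys[0]
--
--     token_lists = [k.split("_") for k in keys]
--
--     if drop_leading_types:
--         token_lists = [_strip_leading_type_tokens(toks) for toks in token_lists]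
--
--     prefix = _common_prefix_tokens(token_lists)
--     if prefix:
--         return "_".join(prefix)
--
--     # Fallback: shortest key is often the most general.
--     return min(keys, key=len)
-- ===== SOURCE B (Python) =====
-- from typing import List
--
-- TYPE_TOKENS = {
--     "int",
--     "float",
--     "bool",
--     "set",
--     "var",
--     "opt",
--     "array",
-- }
--
--
-- def _lcp2(a: List[str], b: List[str]) -> List[str]:
--     # Longest common prefix of TWO token lists.
--     out: List[str] = []
--     for x, y in zip(a, b):
--         if x != y:
--             break
--         out.append(x)
--     return out
--
--
-- def _drop_types(tokens: List[str]) -> List[str]: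
--     for i, tok in enumerate(tokens):
--         if tok not in TYPE_TOKENS:
--             return tokens[i:]
--     # All tokens are type tokens: keep the list unchanged.
--     return tokens
--
--
-- def derive_canonical_name(keys: List[str], drop_leading_types: bool) -> str:
--     if len(keys) == 1:
--         return keys[0]
--
--     token_lists = [k.split("_") for k in keys]
--
--     if drop_leading_types:
--         token_lists = [_drop_types(toks) for toks in token_lists]
--
--     # Fold the pairwise longest-common-prefix over the token lists.
--     prefix = token_lists[0]
--     for toks in token_lists[1:]:
--         prefix = _lcp2(prefix, toks)
--
--     if prefix:
--         return "_".join(prefix)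
--
--     # Fallback: shortest key is often the most general.
--     return min(keys, key=len)
-- ===== Notes on version B (the rewrite author's own statement) =====
-- stated objective: alternative
-- what changed: The common prefix is computed by folding a pairwise longest-common-prefix over the token lists instead of A's column-by-column scan with an all() inner pass over every list per column.
import Mathlib
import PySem

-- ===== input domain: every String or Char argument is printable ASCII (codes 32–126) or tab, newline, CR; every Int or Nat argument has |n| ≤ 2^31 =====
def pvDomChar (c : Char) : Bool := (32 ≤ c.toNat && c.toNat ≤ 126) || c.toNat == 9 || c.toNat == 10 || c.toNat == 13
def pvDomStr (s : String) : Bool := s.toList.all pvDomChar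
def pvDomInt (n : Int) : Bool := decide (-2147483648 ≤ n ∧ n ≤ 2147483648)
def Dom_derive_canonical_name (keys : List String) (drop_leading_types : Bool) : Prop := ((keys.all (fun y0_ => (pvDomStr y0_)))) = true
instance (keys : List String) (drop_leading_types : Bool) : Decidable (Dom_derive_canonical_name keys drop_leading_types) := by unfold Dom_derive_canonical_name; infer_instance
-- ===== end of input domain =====

-- B replaces A's column-by-column common-prefix scan (an all() pass over every list per
-- column) with a fold of a pairwise longest-common-prefix over the token lists; same cost,
-- different traversal (objective: alternative).

-- ===== PORT A =====
-- TYPE_TOKENS; membership in the Python set = membership in these distinct elements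
def pvTypeTokens : List String := ["int", "float", "bool", "set", "var", "opt", "array"]

-- the `while i < len(tokens) and tokens[i] in TYPE_TOKENS: i += 1` loop of A
def pvStripIdx (tokens : List String) (i : Nat) : Nat :=
  if h : i < tokens.length then
    if pvTypeTokens.contains tokens[i] then pvStripIdx tokens (i + 1) else i
  else i
termination_by tokens.length - i

-- A's _strip_leading_type_tokens
def pvStripA (tokens : List String) : List String :=
  let i := pvStripIdx tokens 0
  if i < tokens.length then tokens.drop i else tokens

-- A's `for i in range(min_len): … else break` loop (break = stop recursing);
-- indices are in range whenever i < minLen ≤ each length, so getD "" is exact there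
def pvCptLoop (t0 : List String) (rest : List (List String)) (minLen i : Nat) : List String :=
  if _h : i < minLen then
    -- token = token_lists[0][i]; in range since i < minLen ≤ every length
    if rest.all (fun t => ((t[i]?).getD "") == ((t0[i]?).getD "")) then
      ((t0[i]?).getD "") :: pvCptLoop t0 rest minLen (i + 1)
    else []
  else []
termination_by minLen - i

-- A's _common_prefix_tokens; min(len(toks) for toks) is the running-min loop
def pvCpt (tls : List (List String)) : List String :=
  match tls with
  | [] => []
  | t0 :: rest => pvCptLoop t0 rest ((rest.map List.length).foldl min t0.length) 0

def derive_canonical_name (keys : List String) (drop_leading_types : Bool) : String :=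
  if keys.length == 1 then keys.headD ""   -- keys[0], in range since len(keys) = 1
  else
    let tls := keys.map (fun k => (PySem.Str.split? k "_").getD [])
    let tls := if drop_leading_types then tls.map pvStripA else tls
    let pfx := pvCpt tls
    if pfx ≠ [] then PySem.Str.join "_" pfx
    else (PySem.List.min? keys (fun k => PySem.Str.len k)).getD ""
    -- min(keys, key=len) raises ValueError on keys = []: excluded by Pre_

-- ===== PORT B =====
-- B's _lcp2: zip-and-break pairwise longest common prefix
def pvLcp2 (a b : List String) : List String :=
  match a, b with
  | x :: xs, y :: ys => if x == y then x :: pvLcp2 xs ys else []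
  | _, _ => []

-- B's _drop_types: enumerate scan for the first non-type token
def pvDropTypesGo (tokens rem : List String) (i : Nat) : List String :=
  match rem with
  | [] => tokens
  | tok :: rest =>
    if pvTypeTokens.contains tok then pvDropTypesGo tokens rest (i + 1)
    else tokens.drop i

def pvDropTypes (tokens : List String) : List String :=
  pvDropTypesGo tokens tokens 0

def derive_canonical_name_alt (keys : List String) (drop_leading_types : Bool) : String :=
  if keys.length == 1 then keys.headD ""
  else
    let tls := keys.map (fun k => (PySem.Str.split? k "_").getD [])
    let tls := if drop_leading_types then tls.map pvDropTypes else tls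
    let pfx :=
      match tls with
      | [] => []              -- unreachable under Pre_ (token_lists[0] raises on keys = [])
      | t0 :: rest => rest.foldl pvLcp2 t0
    if pfx ≠ [] then PySem.Str.join "_" pfx
    else (PySem.List.min? keys (fun k => PySem.Str.len k)).getD ""

-- ===== PRECONDITION & SPEC =====
-- keys = [] makes A raise ValueError in min(keys, key=len) when the prefix is empty
-- (and B raise IndexError at token_lists[0]); everything else is admitted.
def Pre_derive_canonical_name (keys : List String) (drop_leading_types : Bool) : Prop :=
  keys ≠ []
instance (keys : List String) (drop_leading_types : Bool) : Decidable (Pre_derive_canonical_name keys drop_leading_types) := by unfold Pre_derive_canonical_name; infer_instance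

def pvWitness_derive_canonical_name : List String × Bool := (["int_lin_eq", "int_lin_ne"], true)

def Spec_derive_canonical_name (keys : List String) (drop_leading_types : Bool) (out : String) : Prop := out = derive_canonical_name_alt keys drop_leading_types
instance (keys : List String) (drop_leading_types : Bool) (out : String) : Decidable (Spec_derive_canonical_name keys drop_leading_types out) := by unfold Spec_derive_canonical_name; infer_instance

-- ===== CLAIM (what is proved, stated in full; the proofs are below) =====
def Claim_equal_derive_canonical_name : Prop := ∀ (keys : List String) (drop_leading_types : Bool), Dom_derive_canonical_name keys drop_leading_types → Pre_derive_canonical_name keys drop_leading_types → Spec_derive_canonical_name keys drop_leading_types (derive_canonical_name keys drop_leading_types)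

-- ===== LEMMAS AND PROOFS =====

-- the two leading-type-token strippers agree
theorem pvDropTypesGo_eq (tokens : List String) :
    ∀ rem i, rem = tokens.drop i → i ≤ tokens.length →
      pvDropTypesGo tokens rem i =
        (if pvStripIdx tokens i < tokens.length then tokens.drop (pvStripIdx tokens i) else tokens) := by
  intro rem
  induction rem with
  | nil =>
    intro i hrem hle
    have hlen : tokens.length ≤ i := by
      by_contra h
      push_neg at h
      have := List.drop_eq_nil_iff.mp hrem.symm
      omega
    unfold pvStripIdx
    simp only [pvDropTypesGo]
    rw [dif_neg (by omega)]
    rw [if_neg (by omega)]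
  | cons tok rest ih =>
    intro i hrem hle
    have hi : i < tokens.length := by
      by_contra h
      push_neg at h
      have : tokens.drop i = [] := List.drop_eq_nil_iff.mpr (by omega)
      rw [this] at hrem
      exact (List.cons_ne_nil _ _) hrem
    have hget : tokens.drop i = tokens[i] :: tokens.drop (i + 1) :=
      List.drop_eq_getElem_cons hi
    rw [hget] at hrem
    rw [List.cons.injEq] at hrem
    obtain ⟨htok, hrest⟩ := hrem
    unfold pvStripIdx
    rw [dif_pos hi]
    simp only [pvDropTypesGo, htok]
    by_cases hc : pvTypeTokens.contains tokens[i]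
    · rw [if_pos hc, if_pos hc]
      exact ih (i + 1) hrest (by omega)
    · rw [if_neg hc, if_neg hc]
      rw [if_pos hi]

theorem pvStrip_eq (tokens : List String) : pvStripA tokens = pvDropTypes tokens := by
  unfold pvStripA pvDropTypes
  exact (pvDropTypesGo_eq tokens tokens 0 (by simp) (by omega)).symm

-- lcp2 basics
theorem pvLcp2_nil_left (b : List String) : pvLcp2 [] b = [] := by
  cases b <;> rfl

theorem pvLcp2_nil_right (a : List String) : pvLcp2 a [] = [] := by
  cases a <;> rfl

theorem foldl_pvLcp2_nil (L : List (List String)) : L.foldl pvLcp2 [] = [] := by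
  induction L with
  | nil => rfl
  | cons l L ih => simp [List.foldl, pvLcp2_nil_left, ih]

theorem foldl_pvLcp2_mem_nil (L : List (List String)) (acc : List String)
    (h : [] ∈ L) : L.foldl pvLcp2 acc = [] := by
  induction L generalizing acc with
  | nil => simp at h
  | cons l L ih =>
    rcases List.mem_cons.mp h with h1 | h2
    · subst h1
      simp [List.foldl, pvLcp2_nil_right, foldl_pvLcp2_nil]
    · exact ih _ h2

theorem pvAll_congr {α : Type} (l : List α) (p q : α → Bool)
    (h : ∀ x ∈ l, p x = q x) : l.all p = l.all q := by
  induction l with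
  | nil => rfl
  | cons a l ih =>
    simp only [List.all_cons, h a (by simp), ih (fun x hx => h x (by simp [hx]))]

-- folding lcp2 from a cons accumulator: strip the agreed head column
theorem foldl_pvLcp2_cons (L : List (List String)) :
    ∀ (a : String) (x : List String), (∀ l ∈ L, l ≠ []) →
    L.foldl pvLcp2 (a :: x) =
      (if L.all (fun l => l.headD "" == a) then a :: (L.map List.tail).foldl pvLcp2 x else []) := by
  induction L with
  | nil => intro a x _; simp
  | cons l L ih =>
    intro a x hne
    obtain ⟨b, bs, rfl⟩ : ∃ b bs, l = b :: bs := by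
      cases l with
      | nil => exact absurd rfl (hne [] (by simp))
      | cons b bs => exact ⟨b, bs, rfl⟩
    have hne' : ∀ l ∈ L, l ≠ [] := fun l hl => hne l (by simp [hl])
    rw [List.foldl_cons]
    have hstep : pvLcp2 (a :: x) (b :: bs) = if a == b then a :: pvLcp2 x bs else [] := rfl
    by_cases hab : a = b
    · subst hab
      rw [hstep, if_pos (by simp)]
      rw [ih a (pvLcp2 x bs) hne']
      simp only [List.all_cons, List.headD_cons, List.map_cons, List.foldl_cons,
        List.tail_cons, beq_self_eq_true, Bool.true_and]
    · have hba : (b == a) = false := by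
        simp only [beq_eq_false_iff_ne, ne_eq]
        exact fun h => hab h.symm
      have hab' : (a == b) = false := by
        simp only [beq_eq_false_iff_ne, ne_eq]
        exact hab
      rw [hstep, hab']
      simp only [if_false, Bool.false_eq_true]
      rw [foldl_pvLcp2_nil]
      simp only [List.all_cons, List.headD_cons, hba, Bool.false_and]
      simp

-- running-min facts
theorem foldl_min_le_init (ns : List Nat) : ∀ a : Nat, ns.foldl min a ≤ a := by
  induction ns with
  | nil => intro a; simp
  | cons n ns ih =>
    intro a
    calc (n :: ns).foldl min a = ns.foldl min (min a n) := rfl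
    _ ≤ min a n := ih _
    _ ≤ a := Nat.min_le_left _ _

theorem foldl_min_le_mem (ns : List Nat) : ∀ (a n : Nat), n ∈ ns → ns.foldl min a ≤ n := by
  induction ns with
  | nil => intro a n h; simp at h
  | cons m ns ih =>
    intro a n h
    rcases List.mem_cons.mp h with h1 | h2
    · subst h1
      calc (n :: ns).foldl min a = ns.foldl min (min a n) := rfl
      _ ≤ min a n := foldl_min_le_init _ _
      _ ≤ n := Nat.min_le_right _ _
    · exact ih _ n h2

theorem foldl_min_eq_or_mem (ns : List Nat) : ∀ a : Nat, ns.foldl min a = a ∨ ns.foldl min a ∈ ns := by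
  induction ns with
  | nil => intro a; left; rfl
  | cons n ns ih =>
    intro a
    rcases ih (min a n) with h | h
    · by_cases hle : a ≤ n
      · left
        calc (n :: ns).foldl min a = ns.foldl min (min a n) := rfl
        _ = min a n := h
        _ = a := Nat.min_eq_left hle
      · right
        have heq : (n :: ns).foldl min a = n := by
          calc (n :: ns).foldl min a = ns.foldl min (min a n) := rfl
          _ = min a n := h
          _ = n := Nat.min_eq_right (by omega)
        rw [heq]
        exact List.mem_cons_self
    · right
      exact List.mem_cons_of_mem _ h

-- the loop of A from column i equals folding lcp2 over the lists with i columns dropped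
theorem pvCptLoop_eq (t0 : List String) (rest : List (List String)) (minLen : Nat)
    (hm : minLen = (rest.map List.length).foldl min t0.length) :
    ∀ k i, minLen - i ≤ k → i ≤ minLen →
      pvCptLoop t0 rest minLen i = (rest.map (List.drop i)).foldl pvLcp2 (t0.drop i) := by
  intro k
  induction k with
  | zero =>
    intro i hk hi
    have hieq : i = minLen := by omega
    subst hieq
    unfold pvCptLoop
    rw [dif_neg (by omega)]
    rcases foldl_min_eq_or_mem (rest.map List.length) t0.length with h | h
    · rw [← hm] at h
      have : t0.drop i = [] := List.drop_eq_nil_iff.mpr (by omega)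
      rw [this, foldl_pvLcp2_nil]
    · rw [← hm] at h
      obtain ⟨l, hl, hlen⟩ := List.mem_map.mp h
      have : l.drop i = [] := List.drop_eq_nil_iff.mpr (by omega)
      have hmem : [] ∈ rest.map (List.drop i) := by
        rw [← this]; exact List.mem_map_of_mem hl
      rw [foldl_pvLcp2_mem_nil _ _ hmem]
  | succ k ih =>
    intro i hk hi
    by_cases hlt : i < minLen
    · have hit0 : i < t0.length := by
        have := foldl_min_le_init (rest.map List.length) t0.length
        omega
      have hirest : ∀ l ∈ rest, i < l.length := by
        intro l hl
        have : minLen ≤ l.length :=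
          hm ▸ foldl_min_le_mem _ _ _ (List.mem_map_of_mem hl)
        omega
      have hdrop0 : t0.drop i = t0[i] :: t0.drop (i + 1) := List.drop_eq_getElem_cons hit0
      have hne : ∀ l ∈ rest.map (List.drop i), l ≠ [] := by
        intro l hl
        obtain ⟨t, ht, rfl⟩ := List.mem_map.mp hl
        have := hirest t ht
        simp only [ne_eq, List.drop_eq_nil_iff, not_le]
        omega
      have hgd : (t0[i]?).getD "" = t0[i] := by
        rw [List.getElem?_eq_getElem hit0]
        rfl
      have hall : ((rest.map (List.drop i)).all fun l => l.headD "" == t0[i])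
          = (rest.all fun t => ((t[i]?).getD "") == ((t0[i]?).getD "")) := by
        rw [List.all_map]
        apply pvAll_congr
        intro t ht
        have hit : i < t.length := hirest t ht
        simp only [Function.comp_apply]
        rw [List.drop_eq_getElem_cons hit, List.headD_cons,
          List.getElem?_eq_getElem hit, List.getElem?_eq_getElem hit0]
        simp
      have htails : (rest.map (List.drop i)).map List.tail = rest.map (List.drop (i + 1)) := by
        rw [List.map_map]
        apply List.map_congr_left
        intro t _
        simp [Function.comp, List.tail_drop]
      unfold pvCptLoop
      rw [dif_pos hlt, hdrop0, foldl_pvLcp2_cons _ _ _ hne, hall, hgd]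
      by_cases hcond : (rest.all fun t => ((t[i]?).getD "") == t0[i]) = true
      · rw [if_pos hcond, if_pos hcond, htails, ih (i + 1) (by omega) (by omega)]
      · rw [if_neg hcond, if_neg hcond]
    · have hieq : i = minLen := by omega
      subst hieq
      unfold pvCptLoop
      rw [dif_neg (by omega)]
      rcases foldl_min_eq_or_mem (rest.map List.length) t0.length with h | h
      · rw [← hm] at h
        have : t0.drop i = [] := List.drop_eq_nil_iff.mpr (by omega)
        rw [this, foldl_pvLcp2_nil]
      · rw [← hm] at h
        obtain ⟨l, hl, hlen⟩ := List.mem_map.mp h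
        have : l.drop i = [] := List.drop_eq_nil_iff.mpr (by omega)
        have hmem : [] ∈ rest.map (List.drop i) := by
          rw [← this]; exact List.mem_map_of_mem hl
        rw [foldl_pvLcp2_mem_nil _ _ hmem]

theorem pvCpt_eq (t0 : List String) (rest : List (List String)) :
    pvCpt (t0 :: rest) = rest.foldl pvLcp2 t0 := by
  have h := pvCptLoop_eq t0 rest ((rest.map List.length).foldl min t0.length) rfl
    ((rest.map List.length).foldl min t0.length) 0 (by omega) (by omega)
  have h0 : rest.map (List.drop 0) = rest := by
    calc rest.map (List.drop 0) = rest.map id := List.map_congr_left (fun a _ => List.drop_zero)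
    _ = rest := List.map_id rest
  show pvCptLoop t0 rest ((rest.map List.length).foldl min t0.length) 0 = rest.foldl pvLcp2 t0
  rw [h, List.drop_zero, h0]

-- ===== VERDICT (by name: the statement is the Claim_ definition above) =====
theorem derive_canonical_name_spec : Claim_equal_derive_canonical_name := by
  intro keys b _dom hpre
  unfold Spec_derive_canonical_name
  cases keys with
  | nil => exact absurd rfl hpre
  | cons k ks =>
    by_cases h1 : ((k :: ks).length == 1) = true
    · simp only [derive_canonical_name, derive_canonical_name_alt, h1, if_true]
    · have hstrip : pvStripA = pvDropTypes := funext pvStrip_eq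
      cases b with
      | false =>
        simp only [derive_canonical_name, derive_canonical_name_alt, h1, if_false,
          Bool.false_eq_true, List.map_cons, hstrip]
        rw [pvCpt_eq]
      | true =>
        simp only [derive_canonical_name, derive_canonical_name_alt, h1, if_false, if_true,
          eq_self_iff_true, Bool.false_eq_true, List.map_cons, hstrip]
        rw [pvCpt_eq]
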